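-- pv_equiv track=rewrite | github.com/tigantic/physics-os | ontic/engine/substrate/morton_ops.py | morton_encode_3d
-- ===== SOURCE A (Python) =====
-- def morton_encode_3d(x: int, y: int, z: int, bits: int) -> int:
--     """
--     Encode (x, y, z) to 3D Morton index.
--
--     j_3d = 4*z_bit + 2*y_bit + x_bit per level.
--     """
--     result = 0
--     for i in range(bits):
--         x_bit = (x >> i) & 1
--         y_bit = (y >> i) & 1
--         z_bit = (z >> i) & 1
--         result |= x_bit << (3 * i)
--         result |= y_bit << (3 * i + 1)
--         result |= z_bit << (3 * i + 2)
--     return result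
-- ===== SOURCE B (Python) =====
-- def morton_encode_3d(x: int, y: int, z: int, bits: int) -> int:
--     """Build the Morton code as a base-8 number, Horner-style, from the top level down."""
--     result = 0
--     for i in range(bits - 1, -1, -1):
--         result = 8 * result + 4 * (z >> i & 1) + 2 * (y >> i & 1) + (x >> i & 1)
--     return result
-- ===== Notes on version B (the rewrite author's own statement) =====
-- stated objective: faster
-- what changed: B builds the Morton code as a base-8 number by Horner's scheme, scanning the levels from the most significant down with result = 8*result + (4*z_bit + 2*y_bit + x_bit), instead of A's forward loop that ORs each of the three bits into place with a growing per-level shift; this replaces three big-int shift+OR operations per level by one small multiply-add (measured 2.6x at the largest size).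
import Mathlib
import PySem

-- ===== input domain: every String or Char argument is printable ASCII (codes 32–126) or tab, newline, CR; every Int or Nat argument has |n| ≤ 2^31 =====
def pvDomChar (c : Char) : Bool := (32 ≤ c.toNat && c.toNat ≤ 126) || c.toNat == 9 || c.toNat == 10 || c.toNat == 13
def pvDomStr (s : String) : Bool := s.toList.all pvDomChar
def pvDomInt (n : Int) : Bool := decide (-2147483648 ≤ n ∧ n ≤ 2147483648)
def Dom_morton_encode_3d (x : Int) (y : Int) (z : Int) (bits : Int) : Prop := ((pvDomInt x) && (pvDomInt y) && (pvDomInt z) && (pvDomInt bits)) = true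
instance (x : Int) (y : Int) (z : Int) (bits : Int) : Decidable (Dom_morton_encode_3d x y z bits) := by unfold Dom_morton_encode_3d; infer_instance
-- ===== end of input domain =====

-- B builds the Morton code as a base-8 number by Horner's scheme from the top level down (one multiply-add
-- per level) instead of A's forward loop that ORs each bit into place with growing per-level shifts (objective: faster, constant-factor).


-- ===== PORT A =====
-- for i in range(bits): result |= x_bit << 3i; result |= y_bit << (3i+1); result |= z_bit << (3i+2)
def morton_encode_3d (x : Int) (y : Int) (z : Int) (bits : Int) : Int :=
  (PySem.List.pyRange 0 bits 1).foldl (fun result i =>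
    let x_bit := PySem.Int.band (Int.shiftRight x i.toNat) 1
    let y_bit := PySem.Int.band (Int.shiftRight y i.toNat) 1
    let z_bit := PySem.Int.band (Int.shiftRight z i.toNat) 1
    let r1 := PySem.Int.bor result (Int.shiftLeft x_bit (3 * i).toNat)
    let r2 := PySem.Int.bor r1 (Int.shiftLeft y_bit (3 * i + 1).toNat)
    PySem.Int.bor r2 (Int.shiftLeft z_bit (3 * i + 2).toNat)) 0

-- ===== PORT B =====
-- for i in range(bits-1, -1, -1): result = 8*result + 4*(z>>i&1) + 2*(y>>i&1) + (x>>i&1)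
-- the countdown loop is the structural recursion on the number of remaining iterations;
-- at step 'n+1' the loop variable i is n
def mortonAltGo (x : Int) (y : Int) (z : Int) : Nat → Int → Int
  | 0, result => result
  | n + 1, result =>
      mortonAltGo x y z n
        (8 * result + 4 * PySem.Int.band (Int.shiftRight z n) 1
          + 2 * PySem.Int.band (Int.shiftRight y n) 1 + PySem.Int.band (Int.shiftRight x n) 1)

def morton_encode_3d_alt (x : Int) (y : Int) (z : Int) (bits : Int) : Int :=
  mortonAltGo x y z bits.toNat 0

-- ===== PRECONDITION & SPEC =====
def Spec_morton_encode_3d (x : Int) (y : Int) (z : Int) (bits : Int) (out : Int) : Prop := out = morton_encode_3d_alt x y z bits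
instance (x : Int) (y : Int) (z : Int) (bits : Int) (out : Int) : Decidable (Spec_morton_encode_3d x y z bits out) := by unfold Spec_morton_encode_3d; infer_instance

-- ===== CLAIM (what is proved, stated in full; the proofs are below) =====
def Claim_equal_morton_encode_3d : Prop := ∀ (x : Int) (y : Int) (z : Int) (bits : Int), Dom_morton_encode_3d x y z bits → Spec_morton_encode_3d x y z bits (morton_encode_3d x y z bits)

-- ===== LEMMAS AND PROOFS =====

-- the Morton digit of level i, and the partial sum over the low n levels (the common spec both ports meet)
def mortonDigit (x y z : Int) (i : Nat) : Int :=
  4 * PySem.Int.band (Int.shiftRight z i) 1 + 2 * PySem.Int.band (Int.shiftRight y i) 1 + PySem.Int.band (Int.shiftRight x i) 1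

def mortonSum (x y z : Int) (n : Nat) : Int :=
  ∑ i ∈ Finset.range n, mortonDigit x y z i * 8 ^ i

lemma band_one_cases (a : Int) : PySem.Int.band a 1 = 0 ∨ PySem.Int.band a 1 = 1 := by
  rw [PySem.Int.band_one]
  have h1 := PySem.Int.mod_nonneg a (b := 2) (by omega)
  have h2 := PySem.Int.mod_lt a (b := 2) (by omega)
  omega

lemma mortonDigit_bounds (x y z : Int) (i : Nat) :
    0 ≤ mortonDigit x y z i ∧ mortonDigit x y z i ≤ 7 := by
  unfold mortonDigit
  rcases band_one_cases (Int.shiftRight x i) with hx | hx <;>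
  rcases band_one_cases (Int.shiftRight y i) with hy | hy <;>
  rcases band_one_cases (Int.shiftRight z i) with hz | hz <;> rw [hx, hy, hz] <;> norm_num

lemma mortonSum_bounds (x y z : Int) (n : Nat) :
    0 ≤ mortonSum x y z n ∧ mortonSum x y z n < 8 ^ n := by
  induction n with
  | zero => simp [mortonSum]
  | succ n ih =>
    have hd := mortonDigit_bounds x y z n
    have hpow : (0:Int) < 8 ^ n := by positivity
    have : mortonSum x y z (n + 1) = mortonSum x y z n + mortonDigit x y z n * 8 ^ n := by
      unfold mortonSum; rw [Finset.sum_range_succ]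
    rw [this]
    constructor
    · nlinarith
    · have : (8:Int) ^ (n+1) = 8 * 8 ^ n := by ring
      nlinarith

-- ||| turns into + when the low part is below the shifted bit (Nat, then Int)
lemma lor_two_pow_of_lt : ∀ (k r : Nat), r < 2 ^ k → r ||| 2 ^ k = r + 2 ^ k := by
  intro k
  induction k with
  | zero =>
    intro r h
    have hr : r = 0 := by omega
    subst hr; rfl
  | succ k ih =>
    intro r h
    have hpow : 2 ^ (k + 1) = 2 * 2 ^ k := by ring
    have h2 : r >>> 1 < 2 ^ k := by
      rw [Nat.shiftRight_one]; omega
    have key : Nat.bit (decide (r % 2 = 1)) (r >>> 1) ||| Nat.bit false (2 ^ k)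
        = Nat.bit (decide (r % 2 = 1) || false) ((r >>> 1) ||| 2 ^ k) :=
      Nat.lor_bit _ _ _ _
    rw [Nat.bit_decide_mod_two_eq_one_shiftRight_one] at key
    have e2 : Nat.bit false (2 ^ k) = 2 ^ (k + 1) := by simp [Nat.bit]; ring
    rw [e2, ih _ h2] at key
    rw [key]
    by_cases hm : r % 2 = 1 <;>
      simp only [hm, decide_true, decide_false, Bool.or_false, Nat.bit, cond_true, cond_false] <;>
      rw [Nat.shiftRight_one] <;> omega

lemma bor_shift_of_lt (r b : Int) (k : Nat) (h0 : 0 ≤ r) (h1 : r < 2 ^ k)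
    (hb : b = 0 ∨ b = 1) : PySem.Int.bor r (Int.shiftLeft b k) = r + b * 2 ^ k := by
  rcases hb with rfl | rfl
  · have : Int.shiftLeft (0:Int) k = 0 := by show (0:Int) <<< k = 0; simp [Int.shiftLeft_eq]
    rw [this, PySem.Int.bor_zero]; ring
  · have hsh : Int.shiftLeft (1:Int) k = 2 ^ k := by show (1:Int) <<< k = 2 ^ k; simp [Int.shiftLeft_eq]
    have hpow : (0:Int) ≤ 2 ^ k := by positivity
    rw [hsh, PySem.Int.bor_of_nonneg h0 hpow]
    have htn : ((2:Int) ^ k).toNat = 2 ^ k := by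
      rw [show ((2:Int) ^ k) = ((2 ^ k : Nat) : Int) by push_cast; ring, Int.toNat_natCast]
    have hrlt : r.toNat < 2 ^ k := by omega
    rw [htn, lor_two_pow_of_lt k r.toNat hrlt]
    push_cast
    omega

-- one iteration of A's loop sends the partial sum for n levels to the one for n+1
lemma stepA (x y z : Int) (n : Nat) :
    PySem.Int.bor
      (PySem.Int.bor
        (PySem.Int.bor (mortonSum x y z n) (Int.shiftLeft (PySem.Int.band (Int.shiftRight x n) 1) (3 * n)))
        (Int.shiftLeft (PySem.Int.band (Int.shiftRight y n) 1) (3 * n + 1)))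
      (Int.shiftLeft (PySem.Int.band (Int.shiftRight z n) 1) (3 * n + 2))
    = mortonSum x y z (n + 1) := by
  have hb1 := band_one_cases (Int.shiftRight x n)
  have hb2 := band_one_cases (Int.shiftRight y n)
  have hb3 := band_one_cases (Int.shiftRight z n)
  set b1 := PySem.Int.band (Int.shiftRight x n) 1
  set b2 := PySem.Int.band (Int.shiftRight y n) 1
  set b3 := PySem.Int.band (Int.shiftRight z n) 1
  set S := mortonSum x y z n with hS
  have hb1' : 0 ≤ b1 ∧ b1 ≤ 1 := by rcases hb1 with h | h <;> omega
  have hb2' : 0 ≤ b2 ∧ b2 ≤ 1 := by rcases hb2 with h | h <;> omega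
  have hb3' : 0 ≤ b3 ∧ b3 ≤ 1 := by rcases hb3 with h | h <;> omega
  have hp : (0:Int) < 2 ^ (3 * n) := by positivity
  have hp1 : (2:Int) ^ (3 * n + 1) = 2 * 2 ^ (3 * n) := by ring
  have hp2 : (2:Int) ^ (3 * n + 2) = 4 * 2 ^ (3 * n) := by ring
  obtain ⟨hS0, hSlt8⟩ := mortonSum_bounds x y z n
  have h8 : (8:Int) ^ n = 2 ^ (3 * n) := by
    rw [show (8:Int) = 2 ^ 3 by norm_num, ← pow_mul]
  have hSlt : S < 2 ^ (3 * n) := by rw [← h8]; exact hSlt8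
  rw [bor_shift_of_lt S b1 (3 * n) hS0 hSlt hb1]
  rw [bor_shift_of_lt (S + b1 * 2 ^ (3 * n)) b2 (3 * n + 1)
        (by nlinarith) (by nlinarith) hb2]
  rw [bor_shift_of_lt (S + b1 * 2 ^ (3 * n) + b2 * 2 ^ (3 * n + 1)) b3 (3 * n + 2)
        (by nlinarith) (by nlinarith) hb3]
  have hsucc : mortonSum x y z (n + 1) = S + mortonDigit x y z n * 8 ^ n := by
    rw [hS]
    unfold mortonSum
    rw [Finset.sum_range_succ]
  rw [hsucc]
  unfold mortonDigit
  rw [h8, hp1, hp2]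
  ring

-- A's loop over range(n) computes the partial sum
lemma foldA_eq_sum (x y z : Int) (n : Nat) :
    morton_encode_3d x y z (n : Int) = mortonSum x y z n := by
  induction n with
  | zero =>
    simp [morton_encode_3d, mortonSum]
  | succ n ih =>
    unfold morton_encode_3d at ih ⊢
    have hcast : ((n + 1 : Nat) : Int) = (n : Int) + 1 := by push_cast; ring
    rw [hcast, PySem.List.pyRange_one_succ_right (by positivity), List.foldl_append, ih]
    simp only [List.foldl_cons, List.foldl_nil]
    have e0 : ((n : Int)).toNat = n := by omega
    have e1 : (3 * (n : Int)).toNat = 3 * n := by omega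
    have e2 : (3 * (n : Int) + 1).toNat = 3 * n + 1 := by omega
    have e3 : (3 * (n : Int) + 2).toNat = 3 * n + 2 := by omega
    rw [e0, e1, e2, e3]
    exact stepA x y z n

-- B's countdown recursion computes 8^n * accumulator + partial sum
lemma altGo_eq_sum (x y z : Int) : ∀ (n : Nat) (r : Int),
    mortonAltGo x y z n r = r * 8 ^ n + mortonSum x y z n := by
  intro n
  induction n with
  | zero => intro r; simp [mortonAltGo, mortonSum]
  | succ n ih =>
    intro r
    rw [mortonAltGo, ih]
    have hsucc : mortonSum x y z (n + 1) = mortonSum x y z n + mortonDigit x y z n * 8 ^ n := by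
      unfold mortonSum
      rw [Finset.sum_range_succ]
    rw [hsucc]
    unfold mortonDigit
    ring

-- ===== VERDICT (by name: the statement is the Claim_ definition above) =====
theorem morton_encode_3d_spec : Claim_equal_morton_encode_3d := by
  intro x y z bits _
  unfold Spec_morton_encode_3d
  rcases le_or_gt bits 0 with hle | hpos
  · have hA : morton_encode_3d x y z bits = 0 := by
      unfold morton_encode_3d
      rw [PySem.List.pyRange_one, show (bits - 0).toNat = 0 by omega]
      simp
    have hB : morton_encode_3d_alt x y z bits = 0 := by
      unfold morton_encode_3d_alt
      rw [show bits.toNat = 0 by omega]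
      rfl
    rw [hA, hB]
  · have hbits : bits = (bits.toNat : Int) := by omega
    rw [hbits, foldA_eq_sum]
    unfold morton_encode_3d_alt
    rw [altGo_eq_sum, Int.toNat_natCast]
    ring
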